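-- pv_equiv track=rewrite | github.com/nokia/ice-support-pkg | HealthChecks/tools/python_utils.py | get_lines_after_label
-- ===== SOURCE A (Python) =====
-- def get_lines_after_label(lines_str, label):
--     label_index = -1
--     lines_list = lines_str.splitlines()
--     for index, row in enumerate(lines_list):
--         if label in row:
--             label_index = index
--             break
--     to_return = lines_list[index :] if label_index != -1 else []
--     return "\n".join(to_return)
-- ===== SOURCE B (Python) =====
-- def get_lines_after_label(lines_str, label):
--     result = []
--     collecting = False
--     for row in lines_str.splitlines():
--         if not collecting and label in row:
--             collecting = True
--         if collecting:
--             result.append(row)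
--     return "\n".join(result)
-- ===== Notes on version B (the rewrite author's own statement) =====
-- stated objective: alternative
-- what changed: Replaces the find-first-index-then-slice decomposition with a single streaming pass that keeps a collecting flag and appends rows once the label has been seen.
import Mathlib
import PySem

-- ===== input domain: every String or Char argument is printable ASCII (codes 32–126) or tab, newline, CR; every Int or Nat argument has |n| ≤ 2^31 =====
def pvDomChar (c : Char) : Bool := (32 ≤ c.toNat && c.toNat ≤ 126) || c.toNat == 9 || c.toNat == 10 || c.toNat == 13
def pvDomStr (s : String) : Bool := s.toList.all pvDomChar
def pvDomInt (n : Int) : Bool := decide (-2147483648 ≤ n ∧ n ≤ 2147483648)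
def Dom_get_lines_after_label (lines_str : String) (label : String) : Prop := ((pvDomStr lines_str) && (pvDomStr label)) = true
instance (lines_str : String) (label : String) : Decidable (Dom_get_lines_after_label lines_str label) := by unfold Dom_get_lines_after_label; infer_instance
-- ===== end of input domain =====

-- B replaces A's find-first-index-then-slice decomposition with a single streaming
-- pass keeping a collecting flag; same outputs, proved equivalent on all inputs.


-- ===== PORT A =====
-- the for-loop with break: returns label_index (first enumerated index whose row contains label, -1 if none)
def pvLoopA (label : String) : List (Int × String) → Int
  | [] => -1
  | (i, row) :: rest => if PySem.Str.isIn label row then i else pvLoopA label rest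

def get_lines_after_label (lines_str : String) (label : String) : String :=
  let lines_list := PySem.Str.splitlines lines_str
  let label_index := pvLoopA label (PySem.List.enumerate lines_list 0)
  let to_return := if label_index ≠ -1 then PySem.List.slice lines_list (some label_index) none else []
  PySem.Str.join "\n" to_return

-- ===== PORT B =====
-- one streaming pass: state = (collecting flag, collected rows)
def pvStepB (label : String) (st : Bool × List String) (row : String) : Bool × List String :=
  let collecting := if !st.1 && PySem.Str.isIn label row then true else st.1
  if collecting then (collecting, st.2 ++ [row]) else (collecting, st.2)

def get_lines_after_label_alt (lines_str : String) (label : String) : String :=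
  let st := (PySem.Str.splitlines lines_str).foldl (pvStepB label) (false, [])
  PySem.Str.join "\n" st.2

-- ===== PRECONDITION & SPEC =====
def Spec_get_lines_after_label (lines_str : String) (label : String) (out : String) : Prop := out = get_lines_after_label_alt lines_str label
instance (lines_str : String) (label : String) (out : String) : Decidable (Spec_get_lines_after_label lines_str label out) := by unfold Spec_get_lines_after_label; infer_instance

-- ===== CLAIM (what is proved, stated in full; the proofs are below) =====
def Claim_equal_get_lines_after_label : Prop := ∀ (lines_str : String) (label : String), Dom_get_lines_after_label lines_str label → Spec_get_lines_after_label lines_str label (get_lines_after_label lines_str label)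

-- ===== LEMMAS AND PROOFS =====

-- spec-level description of "lines from the first one containing label"
def pvDropUntil (label : String) : List String → List String
  | [] => []
  | r :: rs => if PySem.Str.isIn label r then r :: rs else pvDropUntil label rs

theorem pvDropUntil_length_le (label : String) (ls : List String) :
    (pvDropUntil label ls).length ≤ ls.length := by
  induction ls with
  | nil => simp [pvDropUntil]
  | cons r rs ih =>
    by_cases h : PySem.Chars.isIn label.toList r.toList = true <;>
      simp [pvDropUntil, h] <;> omega

theorem pvStepB_true (label : String) (acc : List String) (ls : List String) :
    ls.foldl (pvStepB label) (true, acc) = (true, acc ++ ls) := by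
  induction ls generalizing acc with
  | nil => simp
  | cons r rs ih => simp [pvStepB, ih]

theorem pvFoldB_eq (label : String) (acc : List String) (ls : List String) :
    (ls.foldl (pvStepB label) (false, acc)).2 = acc ++ pvDropUntil label ls := by
  induction ls generalizing acc with
  | nil => simp [pvDropUntil]
  | cons r rs ih =>
    by_cases h : PySem.Chars.isIn label.toList r.toList = true
    · simp [pvStepB, pvDropUntil, h, pvStepB_true]
    · simp [pvStepB, pvDropUntil, h, ih]

theorem pvLoopA_enum (label : String) (ls : List String) (s : Int) :
    pvLoopA label (PySem.List.enumerate ls s)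
      = if pvDropUntil label ls = [] then -1
        else s + ((ls.length - (pvDropUntil label ls).length : Nat) : Int) := by
  induction ls generalizing s with
  | nil => simp [PySem.List.enumerate_nil, pvLoopA, pvDropUntil]
  | cons r rs ih =>
    by_cases h : PySem.Chars.isIn label.toList r.toList = true
    · simp [PySem.List.enumerate_cons, pvLoopA, pvDropUntil, h]
    · have hlen := pvDropUntil_length_le label rs
      simp only [PySem.List.enumerate_cons, pvLoopA, pvDropUntil,
        PySem.Str.isIn_eq, h, if_false, Bool.false_eq_true, List.length_cons]
      rw [ih]
      by_cases hd : pvDropUntil label rs = []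
      · simp [hd]
      · rw [if_neg hd, if_neg hd]
        have h1 : 1 ≤ (pvDropUntil label rs).length := by
          cases hq : pvDropUntil label rs with
          | nil => exact absurd hq hd
          | cons a as => simp
        omega

theorem pvDropUntil_eq_drop (label : String) (ls : List String) :
    pvDropUntil label ls = ls.drop (ls.length - (pvDropUntil label ls).length) := by
  induction ls with
  | nil => simp [pvDropUntil]
  | cons r rs ih =>
    by_cases h : PySem.Chars.isIn label.toList r.toList = true
    · simp [pvDropUntil, h]
    · have hlen := pvDropUntil_length_le label rs
      simp only [pvDropUntil, PySem.Str.isIn_eq, h, Bool.false_eq_true, if_false,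
        List.length_cons]
      rw [Nat.succ_sub hlen, List.drop_succ_cons]
      exact ih

-- ===== VERDICT (by name: the statement is the Claim_ definition above) =====
theorem get_lines_after_label_spec : Claim_equal_get_lines_after_label := by
  intro lines_str label _
  unfold Spec_get_lines_after_label get_lines_after_label get_lines_after_label_alt
  simp only []
  rw [pvFoldB_eq, List.nil_append, pvLoopA_enum, zero_add]
  set ls := PySem.Str.splitlines lines_str with hls
  by_cases hd : pvDropUntil label ls = []
  · simp [hd]
  · rw [if_neg hd]
    have hnn : ((ls.length - (pvDropUntil label ls).length : Nat) : Int) ≠ -1 := by omega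
    rw [if_pos hnn, PySem.List.slice_from_natCast]
    congr 1
    exact (pvDropUntil_eq_drop label ls).symm
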